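-- pv_equiv track=rewrite | github.com/gkjg8787/kakakuscraping-fastapi | kakaku/itemcomb/sumitemcomb.py | createItemPtn
-- ===== SOURCE A (Python) =====
-- def createItemPtn(itemlist):
--     ngrp ={}
--     for i,item in enumerate(itemlist):
--         if item['itemname'] in ngrp.keys():
--             ngrp[item['itemname']].append(i)
--         else:
--             ngrp[item['itemname']] = [i]
--     return list(ngrp.values())
-- ===== SOURCE B (Python) =====
-- def createItemPtn(itemlist):
--     names = []
--     for item in itemlist:
--         n = item['itemname']
--         if n not in names:
--             names.append(n)
--     return [[i for i, item in enumerate(itemlist) if item['itemname'] == n]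
--             for n in names]
-- ===== Notes on version B (the rewrite author's own statement) =====
-- stated objective: alternative
-- what changed: Replaces the single dict-accumulation pass (grouping indices into a dict keyed by itemname, returning its values) with a key-table-then-scan shape: first collect distinct itemnames in first-appearance order, then for each name collect its indices with a filtered enumerate comprehension.
import Mathlib
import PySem

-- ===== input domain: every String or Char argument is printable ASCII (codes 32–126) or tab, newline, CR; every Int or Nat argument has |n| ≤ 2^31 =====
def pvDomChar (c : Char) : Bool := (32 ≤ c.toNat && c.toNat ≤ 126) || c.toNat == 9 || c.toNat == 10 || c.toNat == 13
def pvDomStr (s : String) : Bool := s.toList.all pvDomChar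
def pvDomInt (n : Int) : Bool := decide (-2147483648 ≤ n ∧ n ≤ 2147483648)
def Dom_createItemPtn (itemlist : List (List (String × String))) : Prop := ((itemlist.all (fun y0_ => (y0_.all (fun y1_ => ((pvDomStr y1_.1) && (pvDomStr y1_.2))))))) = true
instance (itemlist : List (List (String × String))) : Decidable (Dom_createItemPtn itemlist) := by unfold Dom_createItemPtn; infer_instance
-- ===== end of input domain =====

-- B groups item indices by itemname via a distinct-name table plus a filtered-enumerate scan per name
-- instead of A's dict-accumulation pass; alternative decomposition, same return value.

-- item['itemname']; Python raises KeyError when the key is absent, which Pre_ excludes,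
-- so the "" default is never reached inside Pre_.
def pvKey (item : List (String × String)) : String :=
  ((PySem.Dict.mk item).get? "itemname").getD ""

-- ===== PORT A =====
def createItemPtn (itemlist : List (List (String × String))) : List (List Int) :=
  let ngrp : PySem.Dict String (List Int) :=
    (PySem.List.enumerate itemlist 0).foldl
      (fun d p =>
        if d.contains (pvKey p.2) then
          -- ngrp[item['itemname']].append(i): in-place append, position kept
          d.insert (pvKey p.2) (d.getD (pvKey p.2) [] ++ [p.1])
        else
          d.insert (pvKey p.2) [p.1])
      PySem.Dict.empty
  ngrp.values

-- ===== PORT B =====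
def createItemPtn_alt (itemlist : List (List (String × String))) : List (List Int) :=
  let names : PySem.Set String :=
    itemlist.foldl (fun ns it => PySem.Set.add ns (pvKey it)) PySem.Set.empty
  names.map (fun n =>
    ((PySem.List.enumerate itemlist 0).filter (fun p => pvKey p.2 == n)).map (·.1))

-- ===== PRECONDITION & SPEC =====
-- Pre_ excludes items lacking an 'itemname' key, on which Python A (and B) raise KeyError.
def Pre_createItemPtn (itemlist : List (List (String × String))) : Prop :=
  ∀ it ∈ itemlist, (PySem.Dict.mk it).contains "itemname" = true
instance (itemlist : List (List (String × String))) : Decidable (Pre_createItemPtn itemlist) := by unfold Pre_createItemPtn; infer_instance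
def pvWitness_createItemPtn : (List (List (String × String))) :=
  [[("itemname", "a")], [("itemname", "b"), ("price", "3")], [("itemname", "a")]]

def Spec_createItemPtn (itemlist : List (List (String × String))) (out : List (List Int)) : Prop := out = createItemPtn_alt itemlist
instance (itemlist : List (List (String × String))) (out : List (List Int)) : Decidable (Spec_createItemPtn itemlist out) := by unfold Spec_createItemPtn; infer_instance

-- ===== CLAIM (what is proved, stated in full; the proofs are below) =====
def Claim_equal_createItemPtn : Prop := ∀ (itemlist : List (List (String × String))), Dom_createItemPtn itemlist → Pre_createItemPtn itemlist → Spec_createItemPtn itemlist (createItemPtn itemlist)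

-- ===== LEMMAS AND PROOFS =====

-- A's loop body on one (key, index) pair
def pvStep (d : PySem.Dict String (List Int)) (q : String × Int) : PySem.Dict String (List Int) :=
  if d.contains q.1 then d.insert q.1 (d.getD q.1 [] ++ [q.2]) else d.insert q.1 [q.2]

theorem pvStep_keys (d : PySem.Dict String (List Int)) (q : String × Int) :
    (pvStep d q).keys = PySem.Set.add d.keys q.1 := by
  unfold pvStep
  rw [PySem.Set.add_eq_ite]
  by_cases h : d.contains q.1
  · simp only [h, if_true]
    rw [PySem.Dict.keys_insert_of_contains d _ h,
      if_pos ((PySem.Dict.contains_iff_mem_keys d q.1).mp h)]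
  · have h' : d.contains q.1 = false := by simpa using h
    have hm : q.1 ∉ d.keys := fun hm => h ((PySem.Dict.contains_iff_mem_keys d q.1).mpr hm)
    simp only [h', Bool.false_eq_true, if_false]
    rw [PySem.Dict.keys_insert_of_not_contains d _ h', if_neg hm]

theorem pvStep_nodup (d : PySem.Dict String (List Int)) (q : String × Int) (hnd : d.keys.Nodup) :
    (pvStep d q).keys.Nodup := by
  unfold pvStep; split <;> exact PySem.Dict.nodup_keys_insert _ _ _ hnd

theorem pvStep_getD (d : PySem.Dict String (List Int)) (q : String × Int) (c : String) :
    (pvStep d q).getD c [] = if c = q.1 then d.getD c [] ++ [q.2] else d.getD c [] := by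
  unfold pvStep
  by_cases h : d.contains q.1
  · simp only [h, if_true, PySem.Dict.getD_insert]
    split_ifs with hc
    · rw [hc]
    · rfl
  · have h' : d.contains q.1 = false := by simpa using h
    simp only [h', Bool.false_eq_true, if_false, PySem.Dict.getD_insert]
    split_ifs with hc
    · subst hc
      rw [PySem.Dict.getD_of_not_contains d _ h']
      simp
    · rfl

theorem pvFold_keys (l : List (String × Int)) (d : PySem.Dict String (List Int)) (hnd : d.keys.Nodup) :
    (l.foldl pvStep d).keys = PySem.Set.update d.keys (l.map (·.1)) := by
  induction l generalizing d with
  | nil => simp [PySem.Set.update]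
  | cons q t ih =>
    simp only [List.foldl_cons, List.map_cons, PySem.Set.update_cons]
    rw [ih _ (pvStep_nodup d q hnd), pvStep_keys d q]

theorem pvFold_nodup (l : List (String × Int)) (d : PySem.Dict String (List Int)) (hnd : d.keys.Nodup) :
    (l.foldl pvStep d).keys.Nodup := by
  induction l generalizing d with
  | nil => exact hnd
  | cons q t ih => exact ih _ (pvStep_nodup d q hnd)

theorem pvFold_getD (l : List (String × Int)) (d : PySem.Dict String (List Int)) (c : String) :
    (l.foldl pvStep d).getD c [] = d.getD c [] ++ (l.filter (fun q => q.1 == c)).map (·.2) := by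
  induction l generalizing d with
  | nil => simp
  | cons q t ih =>
    simp only [List.foldl_cons, List.filter_cons]
    rw [ih, pvStep_getD]
    by_cases h : c = q.1
    · simp [h]
    · have hb : (q.1 == c) = false := beq_eq_false_iff_ne.mpr (Ne.symm h)
      simp [h, hb]

-- A's fold over enumerate is pvStep folded over the (key, index) pairs
theorem pvA_fold_eq (itemlist : List (List (String × String))) :
    (PySem.List.enumerate itemlist 0).foldl
      (fun d p =>
        if d.contains (pvKey p.2) then
          d.insert (pvKey p.2) (d.getD (pvKey p.2) [] ++ [p.1])
        else
          d.insert (pvKey p.2) [p.1])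
      PySem.Dict.empty
    = ((PySem.List.enumerate itemlist 0).map (fun p => (pvKey p.2, p.1))).foldl pvStep
        PySem.Dict.empty := by
  rw [List.foldl_map]
  rfl

-- ===== VERDICT (by name: the statement is the Claim_ definition above) =====
theorem createItemPtn_spec : Claim_equal_createItemPtn := by
  intro itemlist _ _
  unfold Spec_createItemPtn createItemPtn createItemPtn_alt
  rw [pvA_fold_eq]
  set l := (PySem.List.enumerate itemlist 0).map (fun p => (pvKey p.2, p.1)) with hl
  have hnd0 : (PySem.Dict.empty : PySem.Dict String (List Int)).keys.Nodup :=
    PySem.Dict.nodup_keys_empty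
  have hnd := pvFold_nodup l PySem.Dict.empty hnd0
  rw [PySem.Dict.values_eq_map_keys _ hnd ([] : List Int)]
  have hkeys : (l.foldl pvStep PySem.Dict.empty).keys
      = PySem.Set.ofList (itemlist.map pvKey) := by
    rw [pvFold_keys l PySem.Dict.empty hnd0]
    have : l.map (·.1) = itemlist.map pvKey := by
      rw [hl, List.map_map]
      have := PySem.List.map_snd_enumerate (xs := itemlist) (s := 0)
      calc (PySem.List.enumerate itemlist 0).map ((·.1) ∘ fun p => (pvKey p.2, p.1))
          = ((PySem.List.enumerate itemlist 0).map (·.2)).map pvKey := by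
            rw [List.map_map]; rfl
        _ = itemlist.map pvKey := by rw [this]
    rw [this]
    simp [PySem.Dict.keys_empty, PySem.Set.update_nil_left]
  have hnames : itemlist.foldl (fun ns it => PySem.Set.add ns (pvKey it)) PySem.Set.empty
      = PySem.Set.ofList (itemlist.map pvKey) := by
    rw [← PySem.Set.update_map_eq_foldl_add]
    exact PySem.Set.update_nil_left _
  rw [hkeys, hnames]
  apply List.map_congr_left
  intro n _
  rw [pvFold_getD]
  simp only [PySem.Dict.getD_empty, List.nil_append, hl, List.filter_map, List.map_map]
  rfl
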